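-- pv_equiv track=rewrite | github.com/sangjinsu/python-algorithm-v2 | backjoon/grade/step9/2501.py | solve
-- ===== SOURCE A (Python) =====
-- def solve(num: int, num2: int) -> int:
--     result = []
--     for i in range(1, num + 1):
--         if num % i == 0:
--             result.append(i)
--
--     if len(result) >= num2:
--         return result[num2 - 1]
--     return 0
-- ===== SOURCE B (Python) =====
-- def solve(num: int, num2: int) -> int:
--     small = []
--     large = []
--     i = 1
--     while i * i <= num:
--         if num % i == 0:
--             small.append(i)
--             q = num // i
--             if q != i:
--                 large.append(q)
--         i += 1
--     divisors = small + large[::-1]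
--     if 1 <= num2 <= len(divisors):
--         return divisors[num2 - 1]
--     return 0
-- ===== Notes on version B (the rewrite author's own statement) =====
-- stated objective: faster
-- what changed: Instead of scanning all i in 1..num, B trial-divides only up to sqrt(num), collecting each small divisor together with its cofactor, and concatenates small + reversed(large) to get the sorted divisor list.
-- outside the precondition, e.g. on solve(6, 0): A returns 6, B returns 0; on solve(-3, 0): A raises IndexError, B returns 0
import Mathlib
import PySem

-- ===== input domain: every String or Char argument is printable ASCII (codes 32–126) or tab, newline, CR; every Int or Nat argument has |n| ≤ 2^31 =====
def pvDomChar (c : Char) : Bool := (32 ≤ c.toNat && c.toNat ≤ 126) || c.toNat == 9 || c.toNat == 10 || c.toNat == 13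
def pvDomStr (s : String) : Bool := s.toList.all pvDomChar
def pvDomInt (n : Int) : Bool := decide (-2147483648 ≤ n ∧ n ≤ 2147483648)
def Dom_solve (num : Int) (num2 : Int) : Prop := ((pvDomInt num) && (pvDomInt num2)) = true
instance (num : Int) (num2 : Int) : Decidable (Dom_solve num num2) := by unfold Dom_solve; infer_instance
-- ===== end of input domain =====

-- B replaces A's scan of all i in 1..num by trial division up to sqrt(num),
-- collecting cofactors, for an asymptotically faster divisor enumeration.

-- ===== PORT A =====
def solve (num : Int) (num2 : Int) : Int :=
  let result := (PySem.List.pyRange 1 (num + 1) 1).foldl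
    (fun acc i => if PySem.Int.mod num i == 0 then acc ++ [i] else acc) []
  if num2 ≤ (result.length : Int) then
    -- under Pre_solve (1 ≤ num2) the index num2-1 is in range, so no IndexError
    (PySem.List.pyGet? result (num2 - 1)).getD 0
  else 0

-- ===== PORT B =====
-- the while loop of Source B; the '1 ≤ i' conjunct only certifies termination
-- (the loop is entered with i = 1 and i only grows)
def solveAltLoop (num : Int) (i : Int) (small large : List Int) : List Int × List Int :=
  if h : 1 ≤ i ∧ i * i ≤ num then
    if PySem.Int.mod num i == 0 then
      let q := PySem.Int.floordiv num i
      if q ≠ i then solveAltLoop num (i + 1) (small ++ [i]) (large ++ [q])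
      else solveAltLoop num (i + 1) (small ++ [i]) large
    else solveAltLoop num (i + 1) small large
  else (small, large)
termination_by (num + 1 - i).toNat
decreasing_by
  all_goals
    have h1 := h.1; have h2 := h.2
    have : i ≤ num := by nlinarith
    omega

def solve_alt (num : Int) (num2 : Int) : Int :=
  let p := solveAltLoop num 1 [] []
  let divisors := p.1 ++ p.2.reverse
  if 1 ≤ num2 ∧ num2 ≤ (divisors.length : Int) then
    (PySem.List.pyGet? divisors (num2 - 1)).getD 0
  else 0

-- ===== PRECONDITION & SPEC =====
-- Pre_ excludes num2 ≤ 0, where A either raises IndexError or returns a divisor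
-- picked by Python's negative-index wraparound.
def Pre_solve (num : Int) (num2 : Int) : Prop := 1 ≤ num2
instance (num : Int) (num2 : Int) : Decidable (Pre_solve num num2) := by unfold Pre_solve; infer_instance
def pvWitness_solve : Int × Int := (6, 2)

def Spec_solve (num : Int) (num2 : Int) (out : Int) : Prop := out = solve_alt num num2
instance (num : Int) (num2 : Int) (out : Int) : Decidable (Spec_solve num num2 out) := by unfold Spec_solve; infer_instance

-- ===== CLAIM (what is proved, stated in full; the proofs are below) =====
def Claim_equal_solve : Prop := ∀ (num : Int) (num2 : Int), Dom_solve num num2 → Pre_solve num num2 → Spec_solve num num2 (solve num num2)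

-- ===== LEMMAS AND PROOFS =====

-- A's divisor list: all d in [1, num] with num % d == 0, ascending
def divList (num : Int) : List Int :=
  (PySem.List.pyRange 1 (num + 1) 1).filter (fun d => PySem.Int.mod num d == 0)

-- the tails the loop still produces from counter value i on
def tS (num i : Int) : List Int :=
  (PySem.List.pyRange i (num + 1) 1).filter
    (fun d => decide (d * d ≤ num) && (PySem.Int.mod num d == 0))
def tL (num i : Int) : List Int :=
  ((PySem.List.pyRange i (num + 1) 1).filter
    (fun d => decide (d * d ≤ num) && (PySem.Int.mod num d == 0) && decide (PySem.Int.floordiv num d ≠ d))).map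
    (fun d => PySem.Int.floordiv num d)

lemma pyrange_filter_sq_nil (num i : Int) (p : Int → Bool) (h1 : 1 ≤ i) (h2 : num < i * i) :
    (PySem.List.pyRange i (num + 1) 1).filter
      (fun d => decide (d * d ≤ num) && p d) = [] := by
  rw [List.filter_eq_nil_iff]
  intro d hd
  rw [PySem.List.mem_pyRange_one] at hd
  simp only [Bool.and_eq_true, decide_eq_true_eq, not_and]
  intro hdd
  exfalso
  nlinarith [hd.1, hd.2]

lemma tS_eq_nil (num i : Int) (h1 : 1 ≤ i) (h2 : num < i * i) : tS num i = [] := by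
  unfold tS; exact pyrange_filter_sq_nil num i _ h1 h2

lemma tL_eq_nil (num i : Int) (h1 : 1 ≤ i) (h2 : num < i * i) : tL num i = [] := by
  unfold tL
  rw [show ((fun d => decide (d * d ≤ num) && (PySem.Int.mod num d == 0) && decide (PySem.Int.floordiv num d ≠ d)) : Int → Bool)
      = fun d => decide (d * d ≤ num) && ((PySem.Int.mod num d == 0) && decide (PySem.Int.floordiv num d ≠ d)) from by
        funext d; rw [Bool.and_assoc]]
  rw [pyrange_filter_sq_nil num i _ h1 h2, List.map_nil]

lemma loop_spec (num i : Int) (s l : List Int) (h : 1 ≤ i) :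
    solveAltLoop num i s l = (s ++ tS num i, l ++ tL num i) := by
  rw [solveAltLoop]
  by_cases hc : 1 ≤ i ∧ i * i ≤ num
  · have hlt : i < num + 1 := by nlinarith [hc.1, hc.2]
    have hcons : PySem.List.pyRange i (num + 1) 1 = i :: PySem.List.pyRange (i + 1) (num + 1) 1 :=
      PySem.List.pyRange_one_cons hlt
    rw [dif_pos hc]
    by_cases hm : (PySem.Int.mod num i == 0) = true
    · rw [if_pos hm]
      by_cases hq : PySem.Int.floordiv num i ≠ i
      · rw [if_pos hq, loop_spec num (i + 1) _ _ (by omega)]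
        unfold tS tL
        rw [hcons]
        simp [hc.2, hm, hq]
      · rw [if_neg hq, loop_spec num (i + 1) _ _ (by omega)]
        unfold tS tL
        rw [hcons]
        simp [hc.2, hm, hq]
    · rw [if_neg hm, loop_spec num (i + 1) _ _ (by omega)]
      unfold tS tL
      rw [hcons]
      simp [hc.2, hm]
  · rw [dif_neg hc]
    have h2 : num < i * i := by
      rcases not_and_or.mp hc with h' | h'
      · omega
      · omega
    rw [tS_eq_nil num i h h2, tL_eq_nil num i h h2]
    simp
termination_by (num + 1 - i).toNat
decreasing_by
  all_goals
    have : i ≤ num := by nlinarith [hc.1, hc.2]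
    omega

-- exact cofactor arithmetic for a positive divisor
lemma fd_mul (num d : Int) (hd : 0 < d) (hdvd : d ∣ num) : PySem.Int.floordiv num d * d = num := by
  rw [PySem.Int.floordiv_eq_ediv_of_pos hd]
  exact Int.ediv_mul_cancel hdvd

lemma fd_fd (num d : Int) (hnum : 1 ≤ num) (hd : 0 < d) (hdvd : d ∣ num) :
    PySem.Int.floordiv num (PySem.Int.floordiv num d) = d := by
  have hmul := fd_mul num d hd hdvd
  have hfd : 0 < PySem.Int.floordiv num d := by nlinarith
  set f := PySem.Int.floordiv num d with hf
  rw [PySem.Int.floordiv_eq_ediv_of_pos hfd, ← hmul, Int.mul_ediv_cancel_left d (ne_of_gt hfd)]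

lemma mem_combined (num x : Int) (hnum : 1 ≤ num) :
    x ∈ tS num 1 ++ (tL num 1).reverse ↔ ((1 ≤ x ∧ x < num + 1) ∧ x ∣ num) := by
  simp only [tS, tL, List.mem_append, List.mem_reverse, List.mem_map, List.mem_filter,
    PySem.List.mem_pyRange_one, Bool.and_eq_true, decide_eq_true_eq, beq_iff_eq,
    PySem.Int.mod_eq_zero_iff_dvd]
  constructor
  · rintro (⟨⟨h1, h2⟩, hsq, hdvd⟩ | ⟨d, ⟨⟨hd1, hd2⟩, ⟨hsq, hdvd⟩, hne⟩, rfl⟩)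
    · exact ⟨⟨h1, h2⟩, hdvd⟩
    · have hmul := fd_mul num d (by omega) hdvd
      refine ⟨⟨by nlinarith, by nlinarith⟩, Dvd.intro d (by linarith [hmul])⟩
  · rintro ⟨⟨h1, h2⟩, hdvd⟩
    by_cases hsq : x * x ≤ num
    · exact Or.inl ⟨⟨h1, h2⟩, hsq, hdvd⟩
    · push_neg at hsq
      refine Or.inr ⟨PySem.Int.floordiv num x, ⟨⟨?_, ?_⟩, ⟨?_, ?_⟩, ?_⟩, fd_fd num x hnum (by omega) hdvd⟩
      all_goals
        have hmul := fd_mul num x (by omega) hdvd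
        set e := PySem.Int.floordiv num x with he
      · nlinarith
      · nlinarith
      · nlinarith
      · exact Dvd.intro x (by linarith [hmul])
      · have hfd : PySem.Int.floordiv num (PySem.Int.floordiv num x) = x := fd_fd num x hnum (by omega) hdvd
        rw [hfd]
        intro hcon
        nlinarith

lemma combine (num : Int) : tS num 1 ++ (tL num 1).reverse = divList num := by
  by_cases hn : num < 1
  · have h0 : PySem.List.pyRange 1 (num + 1) 1 = [] := PySem.List.pyRange_one_eq_nil (by omega)
    unfold tS tL divList
    rw [h0]
    simp
  · push_neg at hn
    have hpS : (tS num 1).Pairwise (· < ·) :=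
      List.Pairwise.filter _ (PySem.List.pairwise_lt_pyRange_one 1 (num + 1))
    have hpF : ((PySem.List.pyRange 1 (num + 1) 1).filter
        (fun d => decide (d * d ≤ num) && (PySem.Int.mod num d == 0) && decide (PySem.Int.floordiv num d ≠ d))).Pairwise (· < ·) :=
      List.Pairwise.filter _ (PySem.List.pairwise_lt_pyRange_one 1 (num + 1))
    have hpL : (tL num 1).Pairwise (fun a b => b < a) := by
      unfold tL
      rw [List.pairwise_map]
      refine hpF.imp_of_mem ?_
      intro a b ha hb hab
      simp only [List.mem_filter, PySem.List.mem_pyRange_one, Bool.and_eq_true, decide_eq_true_eq,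
        beq_iff_eq, PySem.Int.mod_eq_zero_iff_dvd] at ha hb
      have hma := fd_mul num a (by omega) ha.2.1.2
      have hmb := fd_mul num b (by omega) hb.2.1.2
      have h1a : 1 ≤ a := ha.1.1
      have h1b : 1 ≤ b := hb.1.1
      have hfb0 : 0 < PySem.Int.floordiv num b := by nlinarith
      have hstep : PySem.Int.floordiv num b * (a + 1) ≤ PySem.Int.floordiv num b * b := by nlinarith
      nlinarith
    have hpRev : ((tL num 1).reverse).Pairwise (· < ·) := by
      rw [List.pairwise_reverse]
      exact hpL
    have hcross : ∀ x ∈ tS num 1, ∀ y ∈ (tL num 1).reverse, x < y := by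
      intro x hx y hy
      rw [List.mem_reverse] at hy
      simp only [tS, tL, List.mem_map, List.mem_filter, PySem.List.mem_pyRange_one,
        Bool.and_eq_true, decide_eq_true_eq, beq_iff_eq, PySem.Int.mod_eq_zero_iff_dvd] at hx hy
      obtain ⟨⟨hx1, _⟩, hxsq, _⟩ := hx
      obtain ⟨d, ⟨⟨hd1, _⟩, ⟨hdsq, hdvd⟩, hne⟩, rfl⟩ := hy
      have hmul := fd_mul num d (by omega) hdvd
      have hgt : d < PySem.Int.floordiv num d := by
        rcases lt_or_eq_of_le (show d ≤ PySem.Int.floordiv num d by nlinarith) with h' | h'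
        · exact h'
        · exact absurd h'.symm hne
      nlinarith
    have hpAll : (tS num 1 ++ (tL num 1).reverse).Pairwise (· < ·) :=
      List.pairwise_append.mpr ⟨hpS, hpRev, hcross⟩
    have hpD : (divList num).Pairwise (· < ·) :=
      List.Pairwise.filter _ (PySem.List.pairwise_lt_pyRange_one 1 (num + 1))
    have hndAll : (tS num 1 ++ (tL num 1).reverse).Nodup := hpAll.imp (fun hab => ne_of_lt hab)
    have hndD : (divList num).Nodup := hpD.imp (fun hab => ne_of_lt hab)
    have hperm : (tS num 1 ++ (tL num 1).reverse).Perm (divList num) := by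
      refine (List.perm_ext_iff_of_nodup hndAll hndD).mpr ?_
      intro x
      rw [mem_combined num x hn]
      simp only [divList, List.mem_filter, PySem.List.mem_pyRange_one, beq_iff_eq,
        PySem.Int.mod_eq_zero_iff_dvd]
    exact PySem.List.eq_of_perm_of_pairwise_le_of_injective (fun x => x) (fun a b hh => hh) hperm
      (hpAll.imp (fun hab => le_of_lt hab)) (hpD.imp (fun hab => le_of_lt hab))

-- ===== VERDICT (by name: the statement is the Claim_ definition above) =====
theorem solve_spec : Claim_equal_solve := by
  intro num num2 _ hpre
  unfold Spec_solve solve solve_alt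
  rw [loop_spec num 1 [] [] (by omega)]
  simp only [List.nil_append]
  rw [combine]
  rw [PySem.List.foldl_append_if_eq_filter]
  simp only [List.nil_append]
  have hpre' : (1 : Int) ≤ num2 := hpre
  by_cases hlen : num2 ≤ ((divList num).length : Int)
  · simp [divList, hpre']
  · simp [divList, hpre']
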